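-- pv_equiv track=rewrite | github.com/A-Ulkryxx/CS320 | Lab 4 Longest Torus/Attempt1.py | get_minimum_indices
-- ===== SOURCE A (Python) =====
-- def get_minimum_indices(torus):
--     m, n = get_index_dimensions(torus)
--     min_val = torus[0][0]
--     min_row = 0
--     min_col = 0
--     for i in range(0, m + 1):
--         for j in range(0, n + 1):
--             if (torus[i][j] < min_val):
--                 min_val = torus[i][j]
--                 min_row = i
--                 min_col = j
--     return min_row, min_col
--
-- def get_index_dimensions(torus):
--     ind_m = len(torus) - 1
--     ind_n = len(torus[0]) - 1
--     return ind_m, ind_n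
-- ===== SOURCE B (Python) =====
-- def get_minimum_indices(torus):
--     # Pass 1: per-row table of (row minimum, first column achieving it).
--     table = []
--     for row in torus:
--         best_v, best_j = row[0], 0
--         for j, v in enumerate(row):
--             if v < best_v:
--                 best_v, best_j = v, j
--         table.append((best_v, best_j))
--     # Pass 2: first row whose minimum is smallest overall.
--     best_i, (best_v, best_j) = 0, table[0]
--     for i, (v, j) in enumerate(table):
--         if v < best_v:
--             best_i, best_v, best_j = i, v, j
--     return best_i, best_j
-- ===== Notes on version B (the rewrite author's own statement) =====
-- stated objective: alternative
-- what changed: Replaces A's single flat row-major nested scan keeping a global (val,row,col) triple by a two-pass decomposition: first build a per-row table of (row minimum, first column achieving it), then one scan over that table for the first row with the smallest row-minimum.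
-- outside the precondition, e.g. on get_minimum_indices([[1, 2], [0, 3, -5]]): A returns (1, 0), B returns (1, 2)
import Mathlib
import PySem

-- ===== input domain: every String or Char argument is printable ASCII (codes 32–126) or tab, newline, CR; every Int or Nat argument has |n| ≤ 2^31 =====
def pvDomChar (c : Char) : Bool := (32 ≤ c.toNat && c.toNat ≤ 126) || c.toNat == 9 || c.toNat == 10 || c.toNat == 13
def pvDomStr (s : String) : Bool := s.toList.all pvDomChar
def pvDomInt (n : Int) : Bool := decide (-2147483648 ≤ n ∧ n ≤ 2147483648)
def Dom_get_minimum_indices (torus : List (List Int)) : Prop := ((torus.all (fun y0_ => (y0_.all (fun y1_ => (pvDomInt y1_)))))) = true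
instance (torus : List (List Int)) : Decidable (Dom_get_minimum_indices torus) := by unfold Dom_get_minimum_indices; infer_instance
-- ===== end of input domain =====

-- B re-implements A's flat row-major minimum scan as two passes (per-row minima table, then a scan of
-- that table); equivalence is proved on nonempty rectangular tori (the function's natural domain).

-- ===== PORT A =====
def get_index_dimensions (torus : List (List Int)) : Int × Int :=
  ((torus.length : Int) - 1, ((PySem.List.pyGetD torus 0 []).length : Int) - 1)

def get_minimum_indices (torus : List (List Int)) : Int × Int :=
  let md := get_index_dimensions torus
  -- min_val, min_row, min_col as one state triple
  let r := (PySem.List.pyRange 0 (md.1 + 1)).foldl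
    (fun st i =>
      (PySem.List.pyRange 0 (md.2 + 1)).foldl
        (fun (st2 : Int × Int × Int) j =>
          if PySem.List.pyGetD (PySem.List.pyGetD torus i []) j 0 < st2.1
          then (PySem.List.pyGetD (PySem.List.pyGetD torus i []) j 0, i, j)
          else st2)
        st)
    (PySem.List.pyGetD (PySem.List.pyGetD torus 0 []) 0 0, 0, 0)
  (r.2.1, r.2.2)

-- ===== PORT B =====
-- pass-1 body: (best_v, best_j) over one row
def pvRowBest (row : List Int) : Int × Int :=
  (PySem.List.enumerate row).foldl
    (fun b p => if p.2 < b.1 then (p.2, p.1) else b)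
    (PySem.List.pyGetD row 0 0, 0)

def get_minimum_indices_alt (torus : List (List Int)) : Int × Int :=
  -- pass 1: per-row table of (row minimum, first column achieving it)
  let table := torus.foldl (fun acc row => acc ++ [pvRowBest row]) []
  -- pass 2: first row whose minimum is smallest overall
  let t0 := PySem.List.pyGetD table 0 (0, 0)
  let r := (PySem.List.enumerate table).foldl
    (fun (b : Int × Int × Int) p => if p.2.1 < b.2.1 then (p.1, p.2.1, p.2.2) else b)
    (0, t0.1, t0.2)
  (r.1, r.2.2)

-- ===== PRECONDITION & SPEC =====
-- Pre_ restricts to the natural domain of a torus: a nonempty rectangular grid with at least one column.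
-- Outside it A raises IndexError (empty torus, empty first row, a later row shorter than the first) or,
-- on a later row LONGER than the first, silently ignores that row's tail — a ragged input is not a torus.
def Pre_get_minimum_indices (torus : List (List Int)) : Prop :=
  torus ≠ [] ∧ torus.headD [] ≠ [] ∧ ∀ row ∈ torus, row.length = (torus.headD []).length
instance (torus : List (List Int)) : Decidable (Pre_get_minimum_indices torus) := by
  unfold Pre_get_minimum_indices; infer_instance

def pvWitness_get_minimum_indices : List (List Int) := [[3, 1, 4], [1, 5, 0], [2, 0, 6]]

def Spec_get_minimum_indices (torus : List (List Int)) (out : Int × Int) : Prop := out = get_minimum_indices_alt torus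
instance (torus : List (List Int)) (out : Int × Int) : Decidable (Spec_get_minimum_indices torus out) := by unfold Spec_get_minimum_indices; infer_instance

-- ===== CLAIM (what is proved, stated in full; the proofs are below) =====
def Claim_equal_get_minimum_indices : Prop := ∀ (torus : List (List Int)), Dom_get_minimum_indices torus → Pre_get_minimum_indices torus → Spec_get_minimum_indices torus (get_minimum_indices torus)

-- ===== LEMMAS AND PROOFS =====

-- B's pass-1 inner fold, started from an arbitrary pair
def pvRbf (l : List (Int × Int)) (b : Int × Int) : Int × Int :=
  l.foldl (fun b p => if p.2 < b.1 then (p.2, p.1) else b) b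

-- how one whole row updates A's (val, row, col) state
def pvCombine (i : Int) (st : Int × Int × Int) (b : Int × Int) : Int × Int × Int :=
  if b.1 < st.1 then (b.1, i, b.2) else st

theorem pvRbf_mono (l : List (Int × Int)) : ∀ b : Int × Int, pvRbf l b = b ∨ (pvRbf l b).1 < b.1 := by
  induction l with
  | nil => intro b; left; rfl
  | cons p l ih =>
    intro b
    simp only [pvRbf, List.foldl_cons]
    by_cases h : p.2 < b.1
    · simp only [if_pos h]
      rcases ih (p.2, p.1) with h2 | h2
      · right; simp only [pvRbf] at h2 ⊢; rw [h2]; exact h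
      · right; simp only [pvRbf] at h2 ⊢; omega
    · simp only [if_neg h]; exact ih b

-- A's scan of one row from state 'pvCombine i st b' ends in 'pvCombine i st (pvRbf l b)'
theorem pvScan_eq (i : Int) (l : List (Int × Int)) : ∀ (b : Int × Int) (st : Int × Int × Int),
    l.foldl (fun st2 p => if p.2 < st2.1 then (p.2, i, p.1) else st2) (pvCombine i st b)
      = pvCombine i st (pvRbf l b) := by
  induction l with
  | nil => intro b st; rfl
  | cons p l ih =>
    intro b st
    simp only [List.foldl_cons, pvRbf]
    by_cases h : p.2 < b.1
    · have : (if p.2 < (pvCombine i st b).1 then (p.2, i, p.1) else pvCombine i st b)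
          = pvCombine i st (p.2, p.1) := by
        unfold pvCombine; split_ifs <;> first | rfl | (exfalso; simp_all; omega)
      rw [this, if_pos h]
      exact ih (p.2, p.1) st
    · have : (if p.2 < (pvCombine i st b).1 then (p.2, i, p.1) else pvCombine i st b)
          = pvCombine i st b := by
        unfold pvCombine; split_ifs <;> first | rfl | (exfalso; simp_all; omega)
      rw [this, if_neg h]
      exact ih b st

theorem pvRowBest_eq_rbf (v : Int) (rest : List Int) :
    pvRowBest (v :: rest) = pvRbf (PySem.List.enumerate rest 1) (v, 0) := by
  simp [pvRowBest, pvRbf, PySem.List.enumerate_cons, PySem.List.pyGetD]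

-- row-level lemma: A's inner loop over a whole row equals one pvCombine with B's row summary
theorem pvInner_row (i : Int) (v : Int) (rest : List Int) (st : Int × Int × Int) :
    (PySem.List.enumerate (v :: rest)).foldl
        (fun st2 p => if p.2 < st2.1 then (p.2, i, p.1) else st2) st
      = pvCombine i st (pvRowBest (v :: rest)) := by
  rw [pvRowBest_eq_rbf, PySem.List.enumerate_cons, List.foldl_cons]
  have : (if v < st.1 then (v, i, (0:Int)) else st) = pvCombine i st (v, 0) := by
    unfold pvCombine; rfl
  rw [this]
  exact pvScan_eq i _ (v, 0) st

-- A's inner loop in pyRange/pyGetD form, for a nonempty row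
theorem pvInner_pyRange (i : Int) (row : List Int) (hne : row ≠ []) (st : Int × Int × Int) :
    (PySem.List.pyRange 0 ((row.length : Int))).foldl
        (fun st2 j => if PySem.List.pyGetD row j 0 < st2.1
                      then (PySem.List.pyGetD row j 0, i, j) else st2) st
      = pvCombine i st (pvRowBest row) := by
  obtain ⟨v, rest, rfl⟩ : ∃ v rest, row = v :: rest := by
    cases row with
    | nil => exact absurd rfl hne
    | cons v rest => exact ⟨v, rest, rfl⟩
  have he := PySem.List.enumerate_eq_map_pyRange (v :: rest) 0
  rw [← pvInner_row i v rest st, he, List.foldl_map]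
  rfl

-- simulation: B's pass-2 state (i, v, j) mirrors A's outer state (v, i, j)
theorem pvSim (g : Int → Int × Int) (l : List Int) : ∀ (a b c : Int),
    l.foldl (fun s i => if (g i).1 < s.2.1 then (i, (g i).1, (g i).2) else s) (b, a, c)
      = (fun r => (r.2.1, r.1, r.2.2)) (l.foldl (fun s i => pvCombine i s (g i)) (a, b, c)) := by
  induction l with
  | nil => intro a b c; rfl
  | cons x l ih =>
    intro a b c
    simp only [List.foldl_cons]
    by_cases h : (g x).1 < a
    · have h1 : (if (g x).1 < ((b, a, c) : Int × Int × Int).2.1 then (x, (g x).1, (g x).2) else (b, a, c)) = ((x : Int), (g x).1, (g x).2) := by simp [h]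
      have h2 : pvCombine x (a, b, c) (g x) = ((g x).1, x, (g x).2) := by unfold pvCombine; simp [h]
      rw [h1, h2]
      exact ih (g x).1 x (g x).2
    · have h1 : (if (g x).1 < ((b, a, c) : Int × Int × Int).2.1 then (x, (g x).1, (g x).2) else (b, a, c)) = ((b : Int), a, c) := by simp [h]
      have h2 : pvCombine x (a, b, c) (g x) = (a, b, c) := by unfold pvCombine; simp [h]
      rw [h1, h2]
      exact ih a b c

-- processing row 0 from A's initial state lands exactly on B's pass-2 initial summary
theorem pvFirst (v : Int) (rest : List Int) :
    pvCombine 0 (v, 0, 0) (pvRowBest (v :: rest))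
      = ((pvRowBest (v :: rest)).1, 0, (pvRowBest (v :: rest)).2) := by
  rw [pvRowBest_eq_rbf]
  rcases pvRbf_mono (PySem.List.enumerate rest 1) (v, 0) with h | h
  · rw [h]; unfold pvCombine; simp
  · unfold pvCombine; rw [if_pos h]

theorem pvA_eq (r0 : List Int) (trest : List (List Int)) (hne0 : r0 ≠ [])
    (hlen : ∀ row ∈ r0 :: trest, row.length = r0.length) :
    get_minimum_indices (r0 :: trest)
      = (fun r => (r.2.1, r.2.2))
          ((PySem.List.pyRange 1 (((r0 :: trest).length : Int))).foldl
            (fun s i => pvCombine i s (pvRowBest (PySem.List.pyGetD (r0 :: trest) i [])))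
            ((pvRowBest r0).1, 0, (pvRowBest r0).2)) := by
  obtain ⟨v0, r0rest, rfl⟩ : ∃ v rest, r0 = v :: rest := by
    cases r0 with
    | nil => exact absurd rfl hne0
    | cons v rest => exact ⟨v, rest, rfl⟩
  simp only [get_minimum_indices, get_index_dimensions]
  have hg0 : PySem.List.pyGetD ((v0 :: r0rest) :: trest) 0 [] = v0 :: r0rest := by
    simp [PySem.List.pyGetD]
  have hv0 : PySem.List.pyGetD (v0 :: r0rest) 0 0 = v0 := by
    simp [PySem.List.pyGetD]
  have hsub : ∀ a : Int, a - 1 + 1 = a := fun a => by ring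
  simp only [hg0, hv0, hsub]
  have hL : (0:Int) < ((((v0 :: r0rest) :: trest).length : Int)) := by simp
  have hcongr := PySem.List.foldl_congr_mem
      (PySem.List.pyRange 0 ((((v0 :: r0rest) :: trest).length : Int)))
      (fun st i => List.foldl
          (fun (st2 : Int × Int × Int) j =>
            if PySem.List.pyGetD (PySem.List.pyGetD ((v0 :: r0rest) :: trest) i []) j 0 < st2.1 then
              (PySem.List.pyGetD (PySem.List.pyGetD ((v0 :: r0rest) :: trest) i []) j 0, i, j)
            else st2)
          st (PySem.List.pyRange 0 (((v0 :: r0rest).length : Int))))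
      (fun st i => pvCombine i st (pvRowBest (PySem.List.pyGetD ((v0 :: r0rest) :: trest) i [])))
      ((v0, 0, 0))
      (by intro st i hi
          have hm := (PySem.List.mem_pyRange_one).1 hi
          have hrowlen : (PySem.List.pyGetD ((v0 :: r0rest) :: trest) i []).length = (v0 :: r0rest).length := by
            rw [PySem.List.pyGetD_eq_getElem _ _ hm.1 hm.2]
            exact hlen _ (List.getElem_mem _)
          have hb : (((v0 :: r0rest).length : Int)) = (((PySem.List.pyGetD ((v0 :: r0rest) :: trest) i []).length : Int)) := by
            exact_mod_cast hrowlen.symm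
          rw [hb]
          exact pvInner_pyRange i _ (by
            intro hnil
            rw [hnil] at hrowlen
            simp at hrowlen) st)
  rw [hcongr, PySem.List.pyRange_one_cons hL, List.foldl_cons]
  simp only [zero_add]
  have hfirst : pvCombine 0 ((v0 : Int), 0, 0) (pvRowBest (PySem.List.pyGetD ((v0 :: r0rest) :: trest) 0 [])) = ((pvRowBest (v0 :: r0rest)).1, 0, (pvRowBest (v0 :: r0rest)).2) := by
    rw [hg0]
    exact pvFirst v0 r0rest
  rw [hfirst]

theorem pvTableGet (ts : List (List Int)) (j : Int) (h0 : 0 ≤ j) (h1 : j < (ts.length : Int)) :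
    PySem.List.pyGetD (List.map pvRowBest ts) j ((0:Int), (0:Int)) = pvRowBest (PySem.List.pyGetD ts j []) := by
  have hlen : j < (((List.map pvRowBest ts).length : Int)) := by simpa using h1
  rw [PySem.List.pyGetD_eq_getElem _ _ h0 hlen, PySem.List.pyGetD_eq_getElem _ _ h0 h1]
  simp

theorem pvB_eq (r0 : List Int) (trest : List (List Int)) :
    get_minimum_indices_alt (r0 :: trest)
      = (fun r => (r.2.1, r.2.2))
          ((PySem.List.pyRange 1 (((r0 :: trest).length : Int))).foldl
            (fun s i => pvCombine i s (pvRowBest (PySem.List.pyGetD (r0 :: trest) i [])))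
            ((pvRowBest r0).1, 0, (pvRowBest r0).2)) := by
  have hL : (0:Int) < (((r0 :: trest).length : Int)) := by
    simp
  simp only [get_minimum_indices_alt, PySem.List.foldl_append_singleton_eq_map, List.nil_append]
  rw [PySem.List.enumerate_eq_map_pyRange (List.map pvRowBest (r0 :: trest)) ((0:Int),(0:Int))]
  simp only [List.foldl_map]
  have ht0 : PySem.List.pyGetD (List.map pvRowBest (r0 :: trest)) 0 ((0:Int),(0:Int)) = pvRowBest r0 := by
    simp [PySem.List.pyGetD]
  have hlen : PySem.List.len (List.map pvRowBest (r0 :: trest)) = (((r0 :: trest).length : Int)) := by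
    simp [PySem.List.len]
  rw [ht0, hlen, PySem.List.pyRange_one_cons hL]
  simp only [List.foldl_cons, ht0, lt_self_iff_false, if_false]
  have hcongr := PySem.List.foldl_congr_mem (PySem.List.pyRange 1 (((r0 :: trest).length : Int)))
      (fun x y => if (PySem.List.pyGetD (List.map pvRowBest (r0 :: trest)) y ((0:Int),(0:Int))).1 < x.2.1 then (y, (PySem.List.pyGetD (List.map pvRowBest (r0 :: trest)) y ((0:Int),(0:Int))).1, (PySem.List.pyGetD (List.map pvRowBest (r0 :: trest)) y ((0:Int),(0:Int))).2) else x)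
      (fun x y => if (pvRowBest (PySem.List.pyGetD (r0 :: trest) y [])).1 < x.2.1 then (y, (pvRowBest (PySem.List.pyGetD (r0 :: trest) y [])).1, (pvRowBest (PySem.List.pyGetD (r0 :: trest) y [])).2) else x)
      (((0:Int), (pvRowBest r0).1, (pvRowBest r0).2))
      (by intro acc j hj
          have hm := (PySem.List.mem_pyRange_one).1 hj
          simp only [pvTableGet (r0 :: trest) j (by omega) hm.2])
  simp only [zero_add]
  rw [hcongr, pvSim (fun i => pvRowBest (PySem.List.pyGetD (r0 :: trest) i [])) _ (pvRowBest r0).1 0 (pvRowBest r0).2]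

-- ===== VERDICT (by name: the statement is the Claim_ definition above) =====
theorem get_minimum_indices_spec : Claim_equal_get_minimum_indices := by
  intro torus _ hpre
  obtain ⟨hne, hne0, hlen⟩ := hpre
  obtain ⟨r0, trest, rfl⟩ : ∃ r0 trest, torus = r0 :: trest := by
    cases torus with
    | nil => exact absurd rfl hne
    | cons r0 trest => exact ⟨r0, trest, rfl⟩
  simp only [List.headD_cons] at hne0 hlen
  show get_minimum_indices _ = get_minimum_indices_alt _
  rw [pvA_eq r0 trest hne0 hlen, pvB_eq r0 trest]
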